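-- pv_equiv track=rewrite | github.com/Handhule90/Hurricane-Visualizer | PythonScript.py | add_missing_dates_and_empty_cells
-- ===== SOURCE A (Python) =====
-- def add_missing_dates_and_empty_cells(data):
--     last_date = None
--     last_row = None
--     if data:
--         data[0] = ['N / A' if not cell else cell for cell in data[0]]
--     for row in data:
--         datetime_cell = row[1]
--         if " " in datetime_cell:
--             last_date = datetime_cell.split()[0]
--         else:
--             row[1] = f"{last_date} {datetime_cell}" if last_date else datetime_cell
--         for i, cell in enumerate(row):
--             if cell == "N / A":
--                 row[i] = None
--             elif not cell and last_row:
--                 row[i] = last_row[i]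
--         last_row = row
--     return data
-- ===== SOURCE B (Python) =====
-- def _last_date(rev_prefix):
--     # Most recent date in the original datetime column, searched backwards.
--     for row in rev_prefix:
--         if " " in row[1]:
--             return row[1].split()[0]
--     return None
--
--
-- def _lookback(rev_prefix, i, cell):
--     # cell is empty: take the most recent nonempty cell of column i (already
--     # date-normalized rows), converting the 'N / A' sentinel to None.
--     for row in rev_prefix:
--         c = row[i]
--         if c:
--             return None if c == "N / A" else c
--     return cell
--
--
-- def add_missing_dates_and_empty_cells(data):
--     # Stateless formulation: every cell's value is computed by a backward search
--     # over the rows above it instead of threading last_date/last_row forward.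
--     if not data:
--         return data
--     grid = [['N / A' if not c else c for c in data[0]]] + data[1:]
--     norm = []
--     for r, row in enumerate(grid):
--         if " " not in row[1]:
--             d = _last_date(grid[:r][::-1])
--             if d:
--                 row = row[:1] + [f"{d} {row[1]}"] + row[2:]
--         norm.append(row)
--     out = [[(None if c == "N / A" else c) if c else _lookback(norm[:r][::-1], i, c)
--             for i, c in enumerate(row)] for r, row in enumerate(norm)]
--     data[:] = out
--     return data
-- ===== Notes on version B (the rewrite author's own statement) =====
-- stated objective: alternative
-- what changed: A threads last_date/last_row state forward through one fused in-place loop; B is stateless: it computes each cell by a backward search over the rows above it (most recent date in the original datetime column, most recent nonempty cell in the same column of the normalized grid), trading A's single O(cells) pass for per-cell lookback scans.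
import Mathlib
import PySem

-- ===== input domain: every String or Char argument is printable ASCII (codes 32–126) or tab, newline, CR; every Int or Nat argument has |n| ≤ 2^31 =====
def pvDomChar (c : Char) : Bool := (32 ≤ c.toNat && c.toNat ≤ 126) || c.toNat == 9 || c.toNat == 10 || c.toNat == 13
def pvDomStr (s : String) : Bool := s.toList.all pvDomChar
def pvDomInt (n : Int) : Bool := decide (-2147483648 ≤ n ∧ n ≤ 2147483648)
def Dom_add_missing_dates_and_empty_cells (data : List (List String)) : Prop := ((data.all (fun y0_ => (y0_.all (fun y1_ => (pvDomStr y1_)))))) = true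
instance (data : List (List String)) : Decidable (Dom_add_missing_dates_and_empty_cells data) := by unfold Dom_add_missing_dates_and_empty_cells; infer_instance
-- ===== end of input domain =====

-- B replaces A's threaded last_date/last_row state with stateless backward searches over the
-- rows above each cell (objective: alternative). Both Pythons mutate `data` in place; the
-- theorems here are about the returned value only.


-- ===== PORT A =====
-- A-side: the per-cell body of A's inner loop ('N / A' -> None; empty -> last_row[i])
def pvCellA (last_row : Option (List (Option String))) (i : Int) (cell : String) : Option String :=
  if cell = "N / A" then none
  else if cell = "" then
    match last_row with
    | some lr => if lr = [] then some cell else (PySem.List.pyGet? lr i).getD none  -- '[] = falsy last_row' mirrors Python truthiness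
    | none => some cell
  else some cell

-- A's single fused loop, threading (last_date, last_row); row.getD 1 "" is row[1]
-- (Pre_ guarantees 2 ≤ row.length), (split₀ dt).getD 0 "" is dt.split()[0] (Pre_ guarantees nonempty).
def pvLoopA : List (List String) → Option String → Option (List (Option String)) → List (List (Option String))
  | [], _, _ => []
  | row :: rest, last_date, last_row =>
    let dt := row.getD 1 ""
    if PySem.Str.isIn " " dt then
      let row' := (PySem.List.enumerate row).map (fun p => pvCellA last_row p.1 p.2)
      row' :: pvLoopA rest (some ((PySem.Str.split₀ dt).getD 0 "")) (some row')
    else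
      let row1 := match last_date with
        | some d => if d = "" then row else row.set 1 (d ++ " " ++ dt)
        | none => row
      let row' := (PySem.List.enumerate row1).map (fun p => pvCellA last_row p.1 p.2)
      row' :: pvLoopA rest last_date (some row')

def add_missing_dates_and_empty_cells (data : List (List String)) : List (List (Option String)) :=
  let data' := match data with
    | [] => ([] : List (List String))
    | r0 :: rest => (r0.map (fun c => if c = "" then "N / A" else c)) :: rest
  pvLoopA data' none none

-- ===== PORT B =====
-- B-side: _last_date — backward search of the original datetime column for the latest date
def pvLastDate : List (List String) → Option String
  | [] => none
  | row :: rest =>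
    let dt := row.getD 1 ""          -- row[1]; Pre_ guarantees 2 ≤ row.length
    if PySem.Str.isIn " " dt then some ((PySem.Str.split₀ dt).getD 0 "") else pvLastDate rest

-- B-side: the 'N / A' -> None conversion of Source B's comprehension
def pvConv (c : String) : Option String := if c = "N / A" then none else some c

-- B-side: _lookback — backward search of column i for the latest nonempty cell
def pvLookback : List (List String) → Int → String → Option String
  | [], _, cell => some cell
  | row :: rest, i, cell =>
    let c := (PySem.List.pyGet? row i).getD ""   -- row[i]; in range under Pre_
    if c ≠ "" then pvConv c else pvLookback rest i cell

-- B-side: builds norm; the accumulator is the reversed prefix grid[:r][::-1] of Source B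
def pvNorm : List (List String) → List (List String) → List (List String)
  | [], _ => []
  | row :: rest, revPrefix =>
    let dt := row.getD 1 ""
    let row' := if PySem.Str.isIn " " dt then row
      else match pvLastDate revPrefix with
        | some d => if d = "" then row else row.set 1 (d ++ " " ++ dt)   -- row[:1]+[f"{d} {row[1]}"]+row[2:]
        | none => row
    row' :: pvNorm rest (row :: revPrefix)

-- B-side: the output comprehension; the accumulator is norm[:r][::-1] of Source B
def pvFillB : List (List String) → List (List String) → List (List (Option String))
  | [], _ => []
  | row :: rest, revPrefix =>
    let row' := (PySem.List.enumerate row).map (fun p =>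
      if p.2 ≠ "" then pvConv p.2 else pvLookback revPrefix p.1 p.2)
    row' :: pvFillB rest (row :: revPrefix)

def add_missing_dates_and_empty_cells_alt (data : List (List String)) : List (List (Option String)) :=
  match data with
  | [] => []
  | r0 :: rest =>
    let grid := (r0.map (fun c => if c = "" then "N / A" else c)) :: rest
    pvFillB (pvNorm grid []) []

-- ===== PRECONDITION & SPEC =====
-- Pre_ excludes exactly the inputs on which A raises IndexError: a row shorter than 2
-- (row[1]), a datetime cell that contains a space but only whitespace (dt.split()[0] on an
-- empty word list), and an empty cell in a column beyond the previous row's length (last_row[i]).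
def Pre_add_missing_dates_and_empty_cells (data : List (List String)) : Prop :=
  (∀ row ∈ data, 2 ≤ row.length ∧
      (PySem.Str.isIn " " (row.getD 1 "") = true → PySem.Str.split₀ (row.getD 1 "") ≠ [])) ∧
  (∀ pr ∈ data.zip data.tail, ∀ i : Nat, i < pr.2.length → pr.2.getD i "x" = "" → i < pr.1.length)
instance (data : List (List String)) : Decidable (Pre_add_missing_dates_and_empty_cells data) := by unfold Pre_add_missing_dates_and_empty_cells; infer_instance

def pvWitness_add_missing_dates_and_empty_cells : List (List String) :=
  [["a", "2020-01-01 10:00", ""], ["", "11:00", "x"]]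

def Spec_add_missing_dates_and_empty_cells (data : List (List String)) (out : List (List (Option String))) : Prop := out = add_missing_dates_and_empty_cells_alt data
instance (data : List (List String)) (out : List (List (Option String))) : Decidable (Spec_add_missing_dates_and_empty_cells data out) := by unfold Spec_add_missing_dates_and_empty_cells; infer_instance

-- ===== CLAIM (what is proved, stated in full; the proofs are below) =====
def Claim_equal_add_missing_dates_and_empty_cells : Prop := ∀ (data : List (List String)), Dom_add_missing_dates_and_empty_cells data → Pre_add_missing_dates_and_empty_cells data → Spec_add_missing_dates_and_empty_cells data (add_missing_dates_and_empty_cells data)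

-- ===== LEMMAS AND PROOFS =====

-- chain form of Pre_'s pair condition: each row's empty cells index into the previous row
def pvChainOK : Option Nat → List (List String) → Prop
  | _, [] => True
  | pl, q :: rest =>
    (∀ i : Nat, i < q.length → q.getD i "x" = "" → ∃ n, pl = some n ∧ i < n) ∧
    pvChainOK (some q.length) rest

-- invariant tying A's threaded last_row to B's reversed norm prefix
def pvInv : Option (List (Option String)) → List (List String) → Prop
  | none, [] => True
  | some l, h :: t => l ≠ [] ∧ l.length = h.length ∧
      ∀ i : Nat, i < l.length → l.getD i none = pvLookback (h :: t) (i : Int) ""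
  | _, _ => False

theorem pvCell_eq (lr : Option (List (Option String))) (revNorm : List (List String))
    (hinv : pvInv lr revNorm) (c : String) (i : Nat)
    (hpre : c = "" → ∃ n, lr.map List.length = some n ∧ i < n) :
    pvCellA lr (i : Int) c = (if c ≠ "" then pvConv c else pvLookback revNorm (i : Int) c) := by
  by_cases hc : c = ""
  · subst hc
    simp only [ne_eq, not_true_eq_false, if_false]
    obtain ⟨n, hn, hin⟩ := hpre rfl
    match lr, revNorm, hinv with
    | some l, h :: t, ⟨hne, hlen, hlook⟩ =>
      simp only [Option.map_some, Option.some.injEq] at hn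
      subst hn
      have : pvCellA (some l) (i : Int) "" = l.getD i none := by
        simp [pvCellA, hne, PySem.List.pyGet?_natCast, List.getD_eq_getElem?_getD]
      rw [this, hlook i hin]
  · simp only [ne_eq, hc, not_false_iff, if_true]
    unfold pvCellA pvConv
    by_cases hna : c = "N / A" <;> simp [hna, hc]

theorem pvInv_next (lr : Option (List (Option String))) (revNorm : List (List String))
    (hinv : pvInv lr revNorm) (nrow : List String) (hnz : nrow ≠ [])
    (hpre : ∀ i : Nat, i < nrow.length → nrow.getD i "x" = "" → ∃ n, lr.map List.length = some n ∧ i < n) :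
    pvInv (some ((PySem.List.enumerate nrow).map (fun p => pvCellA lr p.1 p.2))) (nrow :: revNorm) := by
  refine ⟨?_, by simp, ?_⟩
  · intro h
    apply hnz
    have := congrArg List.length h
    simpa using this
  · intro i hi
    simp only [List.length_map, PySem.List.length_enumerate] at hi
    have h1 : ((PySem.List.enumerate nrow).map (fun p => pvCellA lr p.1 p.2)).getD i none
        = pvCellA lr (i : Int) nrow[i] := by
      rw [List.getD_eq_getElem?_getD, List.getElem?_map]
      simp [PySem.List.getElem?_enumerate, List.getElem?_eq_getElem hi]
    rw [h1, pvCell_eq lr revNorm hinv _ i (fun hc => hpre i hi (by rw [List.getD_eq_getElem?_getD, List.getElem?_eq_getElem hi]; simpa using hc))]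
    have h2 : pvLookback (nrow :: revNorm) (i : Int) "" =
        (if nrow[i] ≠ "" then pvConv nrow[i] else pvLookback revNorm (i : Int) "") := by
      simp only [pvLookback]
      simp [PySem.List.pyGet?_natCast, List.getElem?_eq_getElem hi]
    rw [h2]
    by_cases hc : nrow[i] = "" <;> simp [hc]

theorem pvMap_eq (lr : Option (List (Option String))) (revNorm : List (List String))
    (hinv : pvInv lr revNorm) (nrow : List String)
    (hpre : ∀ i : Nat, i < nrow.length → nrow.getD i "x" = "" → ∃ n, lr.map List.length = some n ∧ i < n) :
    (PySem.List.enumerate nrow).map (fun p => pvCellA lr p.1 p.2)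
      = (PySem.List.enumerate nrow).map (fun p => if p.2 ≠ "" then pvConv p.2 else pvLookback revNorm p.1 p.2) := by
  apply List.ext_getElem (by simp)
  intro k h1 h2
  have hk : k < nrow.length := by simpa using h1
  simp only [List.getElem_map, PySem.List.getElem_enumerate, zero_add]
  exact pvCell_eq lr revNorm hinv nrow[k] k (fun hc => by
    refine hpre k (by simpa using h1) ?_
    rw [List.getD_eq_getElem _ _ (by simpa using h1)]
    exact hc)

theorem pvMain : ∀ (rows revOrig revNorm : List (List String)) (lr : Option (List (Option String))),
    (∀ row ∈ rows, 2 ≤ row.length) →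
    pvChainOK (lr.map List.length) rows →
    pvInv lr revNorm →
    pvLoopA rows (pvLastDate revOrig) lr = pvFillB (pvNorm rows revOrig) revNorm := by
  intro rows
  induction rows with
  | nil => intro _ _ _ _ _ _; rfl
  | cons row rest ih =>
    intro revOrig revNorm lr hlen hch hinv
    have hrowlen : 2 ≤ row.length := hlen row (by simp)
    -- the normalized row (what pvNorm produces for this row)
    set dt := row.getD 1 "" with hdt
    set nrow : List String := (if PySem.Str.isIn " " dt then row
      else match pvLastDate revOrig with
        | some d => if d = "" then row else row.set 1 (d ++ " " ++ dt)
        | none => row) with hnrow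
    have hnlen : nrow.length = row.length := by
      rw [hnrow]; split
      · rfl
      · split
        · split <;> simp
        · rfl
    have hempty : ∀ i : Nat, nrow.getD i "x" = "" → row.getD i "x" = "" := by
      intro i he
      rw [List.getD_eq_getElem?_getD] at he ⊢
      rw [hnrow] at he
      by_cases hsp : (PySem.Str.isIn " " dt : Bool) = true
      · rw [if_pos hsp] at he; exact he
      · rw [if_neg hsp] at he
        split at he
        · split at he
          · exact he
          · by_cases h1i : i = 1
            · subst h1i
              rw [List.getElem?_set_self (by omega)] at he
              simp only [Option.getD_some] at he
              exfalso
              have := congrArg String.toList he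
              simp [String.toList_append] at this
            · rwa [List.getElem?_set_ne (by omega)] at he
        · exact he
    have hpre' : ∀ i : Nat, i < nrow.length → nrow.getD i "x" = "" → ∃ n, lr.map List.length = some n ∧ i < n := by
      intro i hi he
      exact hch.1 i (by omega) (hempty i he)
    have hnz : nrow ≠ [] := by
      intro h; rw [h] at hnlen; simp at hnlen; omega
    -- per-row map equality
    have hmap := pvMap_eq lr revNorm hinv nrow hpre'
    -- invariant for the next step
    have hinv' := pvInv_next lr revNorm hinv nrow hnz hpre'
    have hlenmap : ((PySem.List.enumerate nrow).map (fun p => pvCellA lr p.1 p.2)).length = row.length := by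
      simp [hnlen]
    -- unfold one step of each side
    by_cases hsp : (PySem.Str.isIn " " dt : Bool) = true
    · have hA : pvLoopA (row :: rest) (pvLastDate revOrig) lr
          = ((PySem.List.enumerate nrow).map (fun p => pvCellA lr p.1 p.2))
            :: pvLoopA rest (some ((PySem.Str.split₀ dt).getD 0 "")) (some ((PySem.List.enumerate nrow).map (fun p => pvCellA lr p.1 p.2))) := by
        simp only [pvLoopA, ← hdt, hsp, if_true]
        rw [hnrow, if_pos hsp]
      have hB : pvFillB (pvNorm (row :: rest) revOrig) revNorm
          = ((PySem.List.enumerate nrow).map (fun p => if p.2 ≠ "" then pvConv p.2 else pvLookback revNorm p.1 p.2))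
            :: pvFillB (pvNorm rest (row :: revOrig)) (nrow :: revNorm) := by
        simp only [pvNorm, ← hdt, ← hnrow, pvFillB]
      rw [hA, hB, ← hmap]
      congr 1
      have hld : pvLastDate (row :: revOrig) = some ((PySem.Str.split₀ dt).getD 0 "") := by
        simp only [pvLastDate, ← hdt, hsp, if_true]
      rw [← hld]
      apply ih (row :: revOrig) (nrow :: revNorm) _
        (fun r hr => hlen r (by simp [hr]))
        (by simpa [hlenmap] using hch.2)
        hinv'
    · have hA : pvLoopA (row :: rest) (pvLastDate revOrig) lr
          = ((PySem.List.enumerate nrow).map (fun p => pvCellA lr p.1 p.2))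
            :: pvLoopA rest (pvLastDate revOrig) (some ((PySem.List.enumerate nrow).map (fun p => pvCellA lr p.1 p.2))) := by
        simp only [pvLoopA, ← hdt, hsp, if_false, Bool.false_eq_true]
        rw [hnrow, if_neg hsp]
      have hB : pvFillB (pvNorm (row :: rest) revOrig) revNorm
          = ((PySem.List.enumerate nrow).map (fun p => if p.2 ≠ "" then pvConv p.2 else pvLookback revNorm p.1 p.2))
            :: pvFillB (pvNorm rest (row :: revOrig)) (nrow :: revNorm) := by
        simp only [pvNorm, ← hdt, ← hnrow, pvFillB]
      rw [hA, hB, ← hmap]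
      congr 1
      have hld : pvLastDate (row :: revOrig) = pvLastDate revOrig := by
        simp only [pvLastDate, ← hdt, hsp, if_false, Bool.false_eq_true]
      rw [← hld]
      apply ih (row :: revOrig) (nrow :: revNorm) _
        (fun r hr => hlen r (by simp [hr]))
        (by simpa [hlenmap] using hch.2)
        hinv'

theorem pvChainOK_of_pairs : ∀ (rest : List (List String)) (prev : List String),
    (∀ pr ∈ (prev :: rest).zip rest, ∀ i : Nat, i < pr.2.length → pr.2.getD i "x" = "" → i < pr.1.length) →
    pvChainOK (some prev.length) rest := by
  intro rest
  induction rest with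
  | nil => intro _ _; trivial
  | cons q rest' ih =>
    intro prev hp
    refine ⟨fun i hi he => ⟨prev.length, rfl, hp (prev, q) (by simp [List.zip_cons_cons]) i hi he⟩, ?_⟩
    exact ih q (fun pr hpr => hp pr (by rw [List.zip_cons_cons]; exact List.mem_cons_of_mem _ hpr))

theorem pvSent_no_empty (r0 : List String) (i : Nat) :
    (r0.map (fun c => if c = "" then "N / A" else c)).getD i "x" = "" → False := by
  intro he
  rw [List.getD_eq_getElem?_getD, List.getElem?_map] at he
  match h : r0[i]? with
  | none => rw [h] at he; simp at he
  | some c =>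
    rw [h] at he
    simp only [Option.map_some, Option.getD_some] at he
    by_cases hc : c = "" <;> simp [hc] at he

-- ===== VERDICT (by name: the statement is the Claim_ definition above) =====
theorem add_missing_dates_and_empty_cells_spec : Claim_equal_add_missing_dates_and_empty_cells := by
  intro data _ hpre
  unfold Spec_add_missing_dates_and_empty_cells add_missing_dates_and_empty_cells
    add_missing_dates_and_empty_cells_alt
  cases data with
  | nil => rfl
  | cons r0 rest =>
    obtain ⟨h1, h2⟩ := hpre
    refine pvMain ((r0.map (fun c => if c = "" then "N / A" else c)) :: rest) [] [] none ?_ ?_ trivial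
    · intro row hrow
      rcases List.mem_cons.mp hrow with h | h
      · subst h; simpa using (h1 r0 (by simp)).1
      · exact (h1 row (List.mem_cons_of_mem _ h)).1
    · refine ⟨fun i hi he => absurd he (fun he => pvSent_no_empty r0 i he), ?_⟩
      have := pvChainOK_of_pairs rest r0 (by simpa using h2)
      simpa using this
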